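-- pv_equiv track=rewrite | github.com/r0mk/shelter | fttb_cable_test.py | qtech_output_decoration
-- ===== SOURCE A (Python) =====
-- def qtech_output_decoration(qtech_raw_output):
--     result = []
--     word_list = ['Pairs', 'NA', 'open', 'short', 'well' ]
--     for s in qtech_raw_output:
--         for word in word_list:
--             if word in s:
--                 s = s.replace('short', 'short <img src="icon_sad.gif">')
--                 result.append(s)
--     return result
-- ===== SOURCE B (Python) =====
-- def qtech_output_decoration(qtech_raw_output):
--     word_list = ['Pairs', 'NA', 'open', 'short', 'well']
--     icon = ' <img src="icon_sad.gif">'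
--     return [s.replace('short', 'short' + icon)
--             for s in qtech_raw_output
--             if any(word in s for word in word_list)]
-- ===== Notes on version B (the rewrite author's own statement) =====
-- stated objective: simpler
-- what changed: Replaces A's nested loop that mutates s and appends once per matched keyword with a single filter-and-decorate comprehension that emits each matching line exactly once.
-- intended difference: On inputs where some line contains two or more of the keywords, A appends that line once per matching keyword while cumulatively re-replacing 'short' (so duplicates with growing icon suffixes); B emits each matching line once with a single icon, which is the intended decoration. — e.g. on qtech_output_decoration(["NA open"]): A returns ["NA open", "NA open"], B returns ["NA open"]
import Mathlib
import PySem

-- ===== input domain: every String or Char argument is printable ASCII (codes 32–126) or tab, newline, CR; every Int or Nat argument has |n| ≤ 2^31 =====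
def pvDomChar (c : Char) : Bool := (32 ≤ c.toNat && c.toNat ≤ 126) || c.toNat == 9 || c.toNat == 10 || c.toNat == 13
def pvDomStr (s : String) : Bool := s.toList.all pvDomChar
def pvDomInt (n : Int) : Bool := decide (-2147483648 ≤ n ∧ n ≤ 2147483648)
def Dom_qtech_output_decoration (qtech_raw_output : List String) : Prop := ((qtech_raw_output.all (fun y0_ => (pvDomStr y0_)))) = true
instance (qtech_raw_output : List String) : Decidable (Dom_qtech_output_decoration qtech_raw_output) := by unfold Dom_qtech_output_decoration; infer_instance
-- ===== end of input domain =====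

-- B replaces A's nested keyword loop (which mutates s and appends once per matched
-- keyword) by a single filter-and-decorate comprehension emitting each matching line
-- once; the difference on lines matching ≥ 2 keywords is stated as D_ below.

-- ===== PORT A =====
def pvWordList : List String := ["Pairs", "NA", "open", "short", "well"]

def pvDecorated : String := "short <img src=\"icon_sad.gif\">"

def qtech_output_decoration (qtech_raw_output : List String) : List String :=
  qtech_raw_output.foldl
    (fun result s =>
      (pvWordList.foldl
        (fun (st : String × List String) word =>
          if PySem.Str.isIn word st.1 then
            let s' := PySem.Str.replace st.1 "short" pvDecorated
            (s', st.2 ++ [s'])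
          else st)
        (s, result)).2)
    []

-- ===== PORT B =====
def pvIcon : String := " <img src=\"icon_sad.gif\">"

def qtech_output_decoration_alt (qtech_raw_output : List String) : List String :=
  (qtech_raw_output.filter
      (fun s => pvWordList.any (fun word => PySem.Str.isIn word s))).map
    (fun s => PySem.Str.replace s "short" ("short" ++ pvIcon))

-- ===== PRECONDITION & SPEC =====
-- number of keywords occurring in s (condition on the input only)
def matchCount (s : String) : Nat :=
  (if PySem.Str.isIn "Pairs" s then 1 else 0) + (if PySem.Str.isIn "NA" s then 1 else 0) +
  (if PySem.Str.isIn "open" s then 1 else 0) + (if PySem.Str.isIn "short" s then 1 else 0) +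
  (if PySem.Str.isIn "well" s then 1 else 0)

-- On inputs where some line contains ≥ 2 keywords, A appends that line once per
-- matching keyword while cumulatively re-replacing 'short' (duplicates with growing
-- icon suffixes); B emits each matching line once with one icon, the intended decoration.
def D_qtech_output_decoration (qtech_raw_output : List String) : Prop :=
  ∃ s ∈ qtech_raw_output, 2 ≤ matchCount s
instance (qtech_raw_output : List String) : Decidable (D_qtech_output_decoration qtech_raw_output) := by unfold D_qtech_output_decoration; infer_instance

def Spec_qtech_output_decoration (qtech_raw_output : List String) (out : List String) : Prop := ¬ D_qtech_output_decoration qtech_raw_output → out = qtech_output_decoration_alt qtech_raw_output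
instance (qtech_raw_output : List String) (out : List String) : Decidable (Spec_qtech_output_decoration qtech_raw_output out) := by unfold Spec_qtech_output_decoration; infer_instance

def pvDiffWitness_qtech_output_decoration : List String := ["NA open"]
def pvDiffWitnessOut_qtech_output_decoration : (List String) × (List String) :=
  (["NA open", "NA open"], ["NA open"])

-- ===== CLAIM (what is proved, stated in full; the proofs are below) =====
def Claim_unchanged_qtech_output_decoration : Prop := ∀ (qtech_raw_output : List String), Dom_qtech_output_decoration qtech_raw_output → Spec_qtech_output_decoration qtech_raw_output (qtech_output_decoration qtech_raw_output)
def Claim_changed_qtech_output_decoration : Prop := Dom_qtech_output_decoration (pvDiffWitness_qtech_output_decoration) ∧ D_qtech_output_decoration (pvDiffWitness_qtech_output_decoration) ∧ qtech_output_decoration (pvDiffWitness_qtech_output_decoration) = pvDiffWitnessOut_qtech_output_decoration.1 ∧ qtech_output_decoration_alt (pvDiffWitness_qtech_output_decoration) = pvDiffWitnessOut_qtech_output_decoration.2 ∧ pvDiffWitnessOut_qtech_output_decoration.1 ≠ pvDiffWitnessOut_qtech_output_decoration.2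
def Claim_exact_qtech_output_decoration : Prop := ∀ (qtech_raw_output : List String), Dom_qtech_output_decoration qtech_raw_output → D_qtech_output_decoration qtech_raw_output → qtech_output_decoration qtech_raw_output ≠ qtech_output_decoration_alt qtech_raw_output

-- ===== LEMMAS AND PROOFS =====

-- character-level model of Python's str.replace with needle "short"
def repC (new : List Char) : List Char → List Char
  | [] => []
  | c :: tl =>
    if "short".toList.isPrefixOf (c :: tl) then new ++ repC new ((c :: tl).drop 5)
    else c :: repC new tl
  termination_by l => l.length
  decreasing_by all_goals simp [List.length_drop, List.length_cons]

theorem go_eq_repC (n : List Char) : ∀ (fuel : Nat) (l acc : List Char), l.length ≤ fuel →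
    PySem.Chars.replace.go "short".toList n fuel l acc = acc.reverse ++ repC n l := by
  intro fuel
  induction fuel with
  | zero =>
    intro l acc h
    have : l = [] := List.eq_nil_of_length_eq_zero (Nat.le_zero.mp h)
    subst this
    rw [PySem.Chars.replace.go, repC]
  | succ f ih =>
    intro l acc h
    match l with
    | [] =>
      rw [PySem.Chars.replace.go]
      · rw [repC]; simp
      · omega
    | c :: t =>
      rw [PySem.Chars.replace.go]
      by_cases hp : "short".toList.isPrefixOf (c :: t)
      · rw [if_pos hp, repC, if_pos hp, ih]
        · simp
        · simp at h ⊢; omega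
      · rw [if_neg hp, repC, if_neg hp, ih]
        · simp
        · simp at h ⊢; omega

theorem replaceC_eq (n l : List Char) :
    PySem.Chars.replace l "short".toList n = repC n l := by
  rw [PySem.Chars.replace]
  rw [if_neg (by decide)]
  rw [go_eq_repC n l.length l [] le_rfl]
  simp

def CondM (w a : List Char) : Prop :=
  ∀ k, k < a.length → ∃ i, i < w.length ∧ i < a.length - k ∧ w[i]? ≠ a[k + i]?

theorem not_prefix_of_mismatch (w a Z : List Char) (i : Nat) (hiw : i < w.length)
    (hia : i < a.length) (hne : w[i]? ≠ a[i]?) : ¬ w <+: a ++ Z := by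
  intro h
  obtain ⟨t, ht⟩ := h
  apply hne
  have h1 : w[i]? = (a ++ Z)[i]? := by
    rw [← ht, List.getElem?_append_left hiw]
  rw [h1, List.getElem?_append_left hia]

theorem skip_isIn (w a : List Char) (hc : CondM w a) (Z : List Char) :
    PySem.Chars.isIn w (a ++ Z) = PySem.Chars.isIn w Z := by
  have key : (∃ j, w <+: (a ++ Z).drop j) ↔ (∃ j, w <+: Z.drop j) := by
    constructor
    · rintro ⟨j, hj⟩
      by_cases hja : j < a.length
      · exfalso
        rw [List.drop_append_of_le_length (le_of_lt hja)] at hj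
        obtain ⟨i, hi1, hi2, hi3⟩ := hc j hja
        refine not_prefix_of_mismatch w (a.drop j) Z i hi1 (by simp; omega) ?_ hj
        rw [List.getElem?_drop]
        exact hi3
      · refine ⟨j - a.length, ?_⟩
        rw [List.drop_append, List.drop_eq_nil_of_le (by omega)] at hj
        simpa using hj
    · rintro ⟨j, hj⟩
      refine ⟨a.length + j, ?_⟩
      rw [List.drop_append, List.drop_eq_nil_of_le (by omega)]
      simpa using hj
  have h1 := PySem.Chars.exists_prefix_drop_iff_isIn w (a ++ Z)
  have h2 := PySem.Chars.exists_prefix_drop_iff_isIn w Z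
  have : (PySem.Chars.isIn w (a ++ Z) = true) ↔ (PySem.Chars.isIn w Z = true) := by
    rw [← h1, ← h2]; exact key
  revert this
  cases PySem.Chars.isIn w (a ++ Z) <;> cases PySem.Chars.isIn w Z <;> simp

theorem bool_of_iff {a b : Bool} (h : (a = true) ↔ (b = true)) : a = b := by
  cases a <;> cases b <;> simp_all

theorem prefix_head_iff (q Z : List Char) (hq : q.length ≤ 5) :
    q <+: "short".toList ++ Z ↔ q = List.take q.length "short".toList := by
  rw [List.prefix_iff_eq_take, List.take_append_of_le_length (by simpa using hq)]

theorem pref_repC (t : List Char) : ∀ (x : List Char), ∀ q : List Char, q.length ≤ 5 →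
    (q <+: repC ("short".toList ++ t) x ↔ q <+: x) := by
  intro x
  induction x using repC.induct with
  | case1 => intro q hq; rw [repC]
  | case2 c tl hp ih =>
    intro q hq
    have hx : "short".toList ++ (c :: tl).drop 5 = c :: tl := by
      have := List.prefix_iff_eq_append.mp (List.isPrefixOf_iff_prefix.mp hp)
      simpa using this
    rw [repC, if_pos hp]
    rw [List.append_assoc]
    rw [prefix_head_iff _ _ hq]
    conv_rhs => rw [← hx]
    rw [prefix_head_iff _ _ hq]
  | case3 c tl hp ih =>
    intro q hq
    rw [repC, if_neg hp]
    cases q with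
    | nil => simp
    | cons d q' =>
      rw [List.cons_prefix_cons, List.cons_prefix_cons]
      exact and_congr_right (fun _ => ih q' (by simp at hq; omega))

theorem isIn_of_prefix (sub y : List Char) (h : sub <+: y) : PySem.Chars.isIn sub y = true := by
  rw [← PySem.Chars.exists_prefix_drop_iff_isIn]
  exact ⟨0, by simpa using h⟩

theorem isin_repC (w : List Char)
    (hw : w = "short".toList ∨ (CondM w "short".toList ∧ w.length ≤ 5))
    (hs : CondM w pvIcon.toList) :
    ∀ x, PySem.Chars.isIn w (repC ("short".toList ++ pvIcon.toList) x) = PySem.Chars.isIn w x := by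
  intro x
  induction x using repC.induct with
  | case1 => rw [repC]
  | case2 c tl hp ih =>
    have hx : "short".toList ++ (c :: tl).drop 5 = c :: tl := by
      have := List.prefix_iff_eq_append.mp (List.isPrefixOf_iff_prefix.mp hp)
      simpa using this
    rw [repC, if_pos hp]
    rcases hw with hw | ⟨hcO, hlen⟩
    · subst hw
      rw [List.append_assoc]
      rw [isIn_of_prefix _ _ (List.prefix_append _ _)]
      rw [isIn_of_prefix _ _ (by rw [← hx]; exact List.prefix_append _ _)]
    · rw [List.append_assoc, skip_isIn w _ hcO, skip_isIn w _ hs, ih]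
      conv_rhs => rw [← hx]
      rw [skip_isIn w _ hcO]
  | case3 c tl hp ih =>
    rw [repC, if_neg hp]
    apply bool_of_iff
    rw [PySem.Chars.isIn_iff_infix, PySem.Chars.isIn_iff_infix, List.infix_cons_iff, List.infix_cons_iff]
    have hlen : w.length ≤ 5 := by
      rcases hw with hw | ⟨_, h⟩
      · subst hw; decide
      · exact h
    apply or_congr
    · have : c :: repC ("short".toList ++ pvIcon.toList) tl = repC ("short".toList ++ pvIcon.toList) (c :: tl) := by
        rw [repC, if_neg hp]
      rw [this]
      exact pref_repC pvIcon.toList (c :: tl) w hlen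
    · rw [← PySem.Chars.isIn_iff_infix, ← PySem.Chars.isIn_iff_infix, ih]

theorem toList_replace_short (s n : String) :
    (PySem.Str.replace s "short" n).toList = repC n.toList s.toList := by
  rw [PySem.Str.toList_replace, replaceC_eq]

theorem stab_isIn (w : String)
    (hw : w.toList = "short".toList ∨ (CondM w.toList "short".toList ∧ w.toList.length ≤ 5))
    (hs : CondM w.toList pvIcon.toList) (x : String) :
    PySem.Str.isIn w (PySem.Str.replace x "short" pvDecorated) = PySem.Str.isIn w x := by
  rw [PySem.Str.isIn_eq, PySem.Str.isIn_eq, toList_replace_short]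
  have hd : pvDecorated.toList = "short".toList ++ pvIcon.toList := by decide
  rw [hd]
  exact isin_repC w.toList hw hs x.toList

theorem stab_Pairs (x : String) : PySem.Str.isIn "Pairs" (PySem.Str.replace x "short" pvDecorated) = PySem.Str.isIn "Pairs" x :=
  stab_isIn _ (Or.inr ⟨by unfold CondM; decide, by decide⟩) (by unfold CondM; decide) x
theorem stab_NA (x : String) : PySem.Str.isIn "NA" (PySem.Str.replace x "short" pvDecorated) = PySem.Str.isIn "NA" x :=
  stab_isIn _ (Or.inr ⟨by unfold CondM; decide, by decide⟩) (by unfold CondM; decide) x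
theorem stab_open (x : String) : PySem.Str.isIn "open" (PySem.Str.replace x "short" pvDecorated) = PySem.Str.isIn "open" x :=
  stab_isIn _ (Or.inr ⟨by unfold CondM; decide, by decide⟩) (by unfold CondM; decide) x
theorem stab_short (x : String) : PySem.Str.isIn "short" (PySem.Str.replace x "short" pvDecorated) = PySem.Str.isIn "short" x :=
  stab_isIn _ (Or.inl (by decide)) (by unfold CondM; decide) x
theorem stab_well (x : String) : PySem.Str.isIn "well" (PySem.Str.replace x "short" pvDecorated) = PySem.Str.isIn "well" x :=
  stab_isIn _ (Or.inr ⟨by unfold CondM; decide, by decide⟩) (by unfold CondM; decide) x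

-- A's per-line inner loop as a function
def stepA (res : List String) (s : String) : List String :=
  (pvWordList.foldl
    (fun (st : String × List String) word =>
      if PySem.Str.isIn word st.1 then
        let s' := PySem.Str.replace st.1 "short" pvDecorated
        (s', st.2 ++ [s'])
      else st)
    (s, res)).2

theorem A_eq_foldl (l : List String) :
    qtech_output_decoration l = l.foldl stepA [] := rfl

theorem step_m0 (res : List String) (s : String) (h : matchCount s = 0) :
    stepA res s = res := by
  cases h1 : PySem.Str.isIn "Pairs" s <;>
  cases h2 : PySem.Str.isIn "NA" s <;>
  cases h3 : PySem.Str.isIn "open" s <;>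
  cases h4 : PySem.Str.isIn "short" s <;>
  cases h5 : PySem.Str.isIn "well" s <;>
  (simp only [matchCount, h1, h2, h3, h4, h5, if_true, if_false,
    Bool.false_eq_true, ite_true, ite_false] at h) <;>
  first
    | omega
    | (simp only [stepA, pvWordList, List.foldl, stab_Pairs, stab_NA, stab_open,
        stab_short, stab_well, h1, h2, h3, h4, h5, Bool.false_eq_true, if_true, if_false,
        ite_true, ite_false]; try rfl)

theorem step_m1 (res : List String) (s : String) (h : matchCount s = 1) :
    stepA res s = res ++ [PySem.Str.replace s "short" pvDecorated] := by
  cases h1 : PySem.Str.isIn "Pairs" s <;>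
  cases h2 : PySem.Str.isIn "NA" s <;>
  cases h3 : PySem.Str.isIn "open" s <;>
  cases h4 : PySem.Str.isIn "short" s <;>
  cases h5 : PySem.Str.isIn "well" s <;>
  (simp only [matchCount, h1, h2, h3, h4, h5, if_true, if_false,
    Bool.false_eq_true, ite_true, ite_false] at h) <;>
  first
    | omega
    | (simp only [stepA, pvWordList, List.foldl, stab_Pairs, stab_NA, stab_open,
        stab_short, stab_well, h1, h2, h3, h4, h5, Bool.false_eq_true, if_true, if_false,
        ite_true, ite_false]; try rfl)

theorem step_len (res : List String) (s : String) :
    (stepA res s).length = res.length + matchCount s := by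
  cases h1 : PySem.Str.isIn "Pairs" s <;>
  cases h2 : PySem.Str.isIn "NA" s <;>
  cases h3 : PySem.Str.isIn "open" s <;>
  cases h4 : PySem.Str.isIn "short" s <;>
  cases h5 : PySem.Str.isIn "well" s <;>
  simp only [stepA, matchCount, pvWordList, List.foldl, stab_Pairs, stab_NA,
    stab_open, stab_short, stab_well, h1, h2, h3, h4, h5, Bool.false_eq_true, if_true,
    if_false, ite_true, ite_false, List.length_append, List.length_cons, List.length_nil] <;>
  omega

def pvHit (s : String) : Bool := pvWordList.any (fun word => PySem.Str.isIn word s)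

theorem hit_iff (s : String) : pvHit s = true ↔ 1 ≤ matchCount s := by
  cases h1 : PySem.Str.isIn "Pairs" s <;>
  cases h2 : PySem.Str.isIn "NA" s <;>
  cases h3 : PySem.Str.isIn "open" s <;>
  cases h4 : PySem.Str.isIn "short" s <;>
  cases h5 : PySem.Str.isIn "well" s <;>
  simp only [pvHit, pvWordList, matchCount, List.any_cons, List.any_nil, h1, h2, h3, h4, h5,
    Bool.or_false, Bool.or_true, Bool.true_or, Bool.false_or, if_true, if_false,
    Bool.false_eq_true, ite_true, ite_false] <;>
  decide

theorem repl_eq (s : String) :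
    PySem.Str.replace s "short" ("short" ++ pvIcon) = PySem.Str.replace s "short" pvDecorated := by
  rw [show ("short" ++ pvIcon : String) = pvDecorated from by decide]

theorem unA : ∀ (l : List String) (res : List String), (∀ s ∈ l, matchCount s ≤ 1) →
    l.foldl stepA res = res ++ qtech_output_decoration_alt l := by
  intro l
  induction l with
  | nil => intro res _; simp [qtech_output_decoration_alt]
  | cons s t ih =>
    intro res h
    have hs := h s (by simp)
    have ht : ∀ x ∈ t, matchCount x ≤ 1 := fun x hx => h x (by simp [hx])
    simp only [List.foldl_cons]
    rw [ih _ ht]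
    unfold qtech_output_decoration_alt
    interval_cases hm : matchCount s
    · have hh : pvHit s = false := by
        rw [← Bool.not_eq_true, hit_iff]; omega
      rw [step_m0 _ _ hm]
      simp only [List.filter_cons]
      rw [show (pvWordList.any (fun word => PySem.Str.isIn word s)) = pvHit s from rfl, hh]
      simp
    · have hh : pvHit s = true := hit_iff s |>.mpr (by omega)
      rw [step_m1 _ _ hm]
      simp only [List.filter_cons]
      rw [show (pvWordList.any (fun word => PySem.Str.isIn word s)) = pvHit s from rfl, hh]
      simp [repl_eq]

def sumM (l : List String) : Nat := (l.map matchCount).sum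

theorem lenA : ∀ (l : List String) (res : List String),
    (l.foldl stepA res).length = res.length + sumM l := by
  intro l
  induction l with
  | nil => intro res; simp [sumM]
  | cons s t ih =>
    intro res
    simp only [List.foldl_cons]
    rw [ih, step_len]
    simp [sumM]
    omega

theorem lenB (l : List String) :
    (qtech_output_decoration_alt l).length = (l.filter pvHit).length := by
  unfold qtech_output_decoration_alt pvHit
  rw [List.length_map]

theorem cnt_le : ∀ (l : List String), (l.filter pvHit).length ≤ sumM l := by
  intro l
  induction l with
  | nil => simp [sumM]
  | cons s t ih =>
    simp only [List.filter_cons, sumM, List.map_cons, List.sum_cons]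
    cases hh : pvHit s
    · simp only [sumM] at ih; simp; omega
    · have := (hit_iff s).mp hh
      simp only [sumM] at ih; simp; omega

theorem cnt_lt : ∀ (l : List String), (∃ s ∈ l, 2 ≤ matchCount s) →
    (l.filter pvHit).length < sumM l := by
  intro l
  induction l with
  | nil => rintro ⟨s, hs, _⟩; simp at hs
  | cons s t ih =>
    rintro ⟨x, hx, hm⟩
    simp only [List.filter_cons, sumM, List.map_cons, List.sum_cons]
    rcases List.mem_cons.mp hx with rfl | hxt
    · have h1 := cnt_le t
      simp only [sumM] at h1
      cases hh : pvHit x <;> simp <;> omega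
    · have h1 := ih ⟨x, hxt, hm⟩
      simp only [sumM] at h1
      cases hh : pvHit s
      · simp; omega
      · have := (hit_iff s).mp hh
        simp; omega

-- ===== VERDICT (by name: the statements are the Claim_ definitions above) =====
theorem qtech_output_decoration_spec : Claim_unchanged_qtech_output_decoration := by
  unfold Claim_unchanged_qtech_output_decoration
  intro l _
  unfold Spec_qtech_output_decoration
  intro hD
  rw [A_eq_foldl, unA l [] ?_, List.nil_append]
  intro s hs
  by_contra h
  exact hD ⟨s, hs, by omega⟩

theorem qtech_output_decoration_changed : Claim_changed_qtech_output_decoration := by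
  unfold Claim_changed_qtech_output_decoration; decide

theorem qtech_output_decoration_tight : Claim_exact_qtech_output_decoration := by
  unfold Claim_exact_qtech_output_decoration
  intro l _ hD heq
  have h1 := lenA l []
  have h3 := cnt_lt l hD
  rw [← A_eq_foldl, heq, lenB] at h1
  simp only [List.length_nil, Nat.zero_add] at h1
  omega
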